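-- pv_equiv track=rewrite | github.com/HaratuCodrin/python_problems | A7/main.py | increasing_modulus_dict
-- ===== SOURCE A (Python) =====
-- from math import sqrt as racine
-- import copy
--
-- def increasing_modulus_dict(dict):
--     sequences = [] # tous les sequences
--     sequence = {} # temporaire
--     lowest_modulus = -1
--     for im in dict.keys():
--         a = im
--         b = dict[im]
--         current_modulus = racine(a**2 + b**2)
--         if current_modulus > lowest_modulus:
--             sequence.update({a:b})
--         else:
--             sequences.append(copy.deepcopy(sequence))
--             sequence.clear()
--             sequence.update({a:b})
--         lowest_modulus = current_modulus
--
--     longueur = 0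
--     sequence = {}
--     for seq in sequences:
--         if len(seq) > longueur:
--             longueur = len(seq)
--             sequence = seq
--
--     return longueur, sequence
-- ===== SOURCE B (Python) =====
-- from math import sqrt as racine
--
--
-- def increasing_modulus_dict(dict):
--     # One pass: keep the best completed run and the current run; no list of
--     # all runs and no second scan.  The still-open final run is (as in the
--     # original) never a candidate.
--     best_len = 0
--     best_seq = {}
--     run = {}
--     prev = -1
--     for a in dict.keys():
--         b = dict[a]
--         cur = racine(a ** 2 + b ** 2)
--         if cur > prev:
--             run[a] = b
--         else:
--             if len(run) > best_len:
--                 best_len = len(run)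
--                 best_seq = run
--             run = {a: b}
--         prev = cur
--     return best_len, best_seq
-- ===== Notes on version B (the rewrite author's own statement) =====
-- stated objective: simpler
-- what changed: Single pass that maintains the best completed run while scanning, instead of materialising a list of deep-copied run dicts and scanning that list a second time for the longest.
import Mathlib
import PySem

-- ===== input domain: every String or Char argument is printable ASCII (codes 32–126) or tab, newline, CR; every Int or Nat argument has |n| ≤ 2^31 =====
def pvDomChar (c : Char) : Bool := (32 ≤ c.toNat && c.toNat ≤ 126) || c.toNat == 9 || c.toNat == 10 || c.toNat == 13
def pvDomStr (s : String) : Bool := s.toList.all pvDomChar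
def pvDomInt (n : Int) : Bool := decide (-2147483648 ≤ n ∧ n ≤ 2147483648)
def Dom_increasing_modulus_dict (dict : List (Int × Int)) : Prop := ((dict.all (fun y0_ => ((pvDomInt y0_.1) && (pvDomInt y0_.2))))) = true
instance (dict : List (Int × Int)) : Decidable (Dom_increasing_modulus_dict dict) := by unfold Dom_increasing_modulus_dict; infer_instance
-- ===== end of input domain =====

-- B keeps the best completed run in the single scan instead of collecting deep copies of
-- every run and scanning that list a second time (the open final run is never a candidate,
-- as in A).

-- ===== PORT A =====
-- `racine(a**2 + b**2)`: Python computes the exact integer a²+b², converts it to an IEEE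
-- double and takes the correctly rounded square root; Float.ofInt/Float.sqrt do exactly that
def imdMod (a b : Int) : Float := Float.sqrt (Float.ofInt (a ^ 2 + b ^ 2))

-- one step of A's first loop; `sequence.update({a:b})` is Dict.insert, the else branch
-- appends the (deep-copied) run and restarts it; the third component is lowest_modulus
def imdStepA (st : List (PySem.Dict Int Int) × PySem.Dict Int Int × Float) (p : Int × Int) :
    List (PySem.Dict Int Int) × PySem.Dict Int Int × Float :=
  let cur := imdMod p.1 p.2
  if cur > st.2.2 then (st.1, st.2.1.insert p.1 p.2, cur)
  else (st.1 ++ [st.2.1], (PySem.Dict.empty.insert p.1 p.2), cur)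

-- A's second loop: first strictly-longer run wins
def imdPick (acc : Int × PySem.Dict Int Int) (seq : PySem.Dict Int Int) :
    Int × PySem.Dict Int Int :=
  if (seq.size : Int) > acc.1 then ((seq.size : Int), seq) else acc

def increasing_modulus_dict (dict : List (Int × Int)) : Int × (List (Int × Int)) :=
  let st := dict.foldl imdStepA ([], PySem.Dict.empty, -1)
  let r := st.1.foldl imdPick (0, PySem.Dict.empty)
  (r.1, r.2.items)

-- ===== PORT B =====
-- one step of B's single loop: extend the run, or close it (updating the best on strictly
-- greater length) and restart; same modulus expression as in Source B
def imdStepB (st : (Int × PySem.Dict Int Int) × PySem.Dict Int Int × Float) (p : Int × Int) :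
    (Int × PySem.Dict Int Int) × PySem.Dict Int Int × Float :=
  let cur := imdMod p.1 p.2
  if cur > st.2.2 then (st.1, st.2.1.insert p.1 p.2, cur)
  else ((if (st.2.1.size : Int) > st.1.1 then ((st.2.1.size : Int), st.2.1) else st.1),
        (PySem.Dict.empty.insert p.1 p.2), cur)

def increasing_modulus_dict_alt (dict : List (Int × Int)) : Int × (List (Int × Int)) :=
  let st := dict.foldl imdStepB ((0, PySem.Dict.empty), PySem.Dict.empty, -1)
  (st.1.1, st.1.2.items)

-- ===== PRECONDITION & SPEC =====
def Spec_increasing_modulus_dict (dict : List (Int × Int)) (out : Int × (List (Int × Int))) : Prop := out = increasing_modulus_dict_alt dict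
instance (dict : List (Int × Int)) (out : Int × (List (Int × Int))) : Decidable (Spec_increasing_modulus_dict dict out) := by unfold Spec_increasing_modulus_dict; infer_instance

-- ===== CLAIM (what is proved, stated in full; the proofs are below) =====
def Claim_equal_increasing_modulus_dict : Prop := ∀ (dict : List (Int × Int)), Dom_increasing_modulus_dict dict → Spec_increasing_modulus_dict dict (increasing_modulus_dict dict)

-- ===== LEMMAS AND PROOFS =====

-- Loop invariant: running B's single loop from a best equal to A's second scan of the runs
-- completed so far gives exactly A's second scan of all completed runs, plus A's run state.
theorem imd_loop (l : List (Int × Int)) : ∀ (seqs : List (PySem.Dict Int Int))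
    (seq : PySem.Dict Int Int) (low : Float),
    l.foldl imdStepB (seqs.foldl imdPick (0, PySem.Dict.empty), seq, low)
      = ((l.foldl imdStepA (seqs, seq, low)).1.foldl imdPick (0, PySem.Dict.empty),
         (l.foldl imdStepA (seqs, seq, low)).2) := by
  induction l with
  | nil => intro seqs seq low; rfl
  | cons p t ih =>
    intro seqs seq low
    by_cases h : imdMod p.1 p.2 > low
    · simp only [List.foldl_cons, imdStepA, imdStepB, if_pos h]
      exact ih seqs (seq.insert p.1 p.2) (imdMod p.1 p.2)
    · simp only [List.foldl_cons, imdStepA, imdStepB, if_neg h]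
      have hbest : (if (seq.size : Int) > (seqs.foldl imdPick (0, PySem.Dict.empty)).1
            then ((seq.size : Int), seq) else seqs.foldl imdPick (0, PySem.Dict.empty))
          = (seqs ++ [seq]).foldl imdPick (0, PySem.Dict.empty) := by
        rw [List.foldl_append]; rfl
      rw [hbest]
      exact ih (seqs ++ [seq]) (PySem.Dict.empty.insert p.1 p.2) (imdMod p.1 p.2)

-- ===== VERDICT (by name: the statement is the Claim_ definition above) =====
theorem increasing_modulus_dict_spec : Claim_equal_increasing_modulus_dict := by
  intro dict _
  unfold Spec_increasing_modulus_dict increasing_modulus_dict increasing_modulus_dict_alt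
  have h := imd_loop dict [] PySem.Dict.empty (-1)
  simp only [List.foldl_nil] at h
  rw [h]
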